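-- pv_equiv track=rewrite | github.com/MonSDV/-test-task | 02_templates.py | generate_versions
-- ===== SOURCE A (Python) =====
-- def generate_versions(template):
--     """Генерирует две версии из шаблона, заменяя '*' на числа"""
--     parts = template.split('.')
--     asterisks_indices = [i for i, part in enumerate(parts) if part == '*']
--     versions = []
--
--     # Комбинации для замен *
--     replacements_list = [
--         [1] * len(asterisks_indices),
--         [2] * len(asterisks_indices)
--     ]
--
--     for replacements in replacements_list:
--         version_parts = parts.copy()
--         for idx, replacement in zip(asterisks_indices, replacements):
--             version_parts[idx] = str(replacement)
--         versions.append('.'.join(version_parts))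
--
--     return versions
-- ===== SOURCE B (Python) =====
-- def generate_versions(template):
--     """Генерирует две версии из шаблона, заменяя '*' на числа"""
--     # Single character-level scan: no split/join, no index table; both
--     # versions are built simultaneously, the current part is buffered and
--     # flushed (substituted when it is exactly '*') at each dot and at the end.
--     v1 = v2 = buf = ''
--     for ch in template:
--         if ch == '.':
--             v1 += ('1' if buf == '*' else buf) + '.'
--             v2 += ('2' if buf == '*' else buf) + '.'
--             buf = ''
--         else:
--             buf += ch
--     v1 += '1' if buf == '*' else buf
--     v2 += '2' if buf == '*' else buf
--     return [v1, v2]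
-- ===== Notes on version B (the rewrite author's own statement) =====
-- stated objective: alternative
-- what changed: Replaces split/index-table/copy-mutate/join with a single character-level state machine: one scan over the raw string builds both version strings simultaneously, buffering the current part and flushing it (substituted when it is exactly '*') at each dot and at the end.
import Mathlib
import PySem

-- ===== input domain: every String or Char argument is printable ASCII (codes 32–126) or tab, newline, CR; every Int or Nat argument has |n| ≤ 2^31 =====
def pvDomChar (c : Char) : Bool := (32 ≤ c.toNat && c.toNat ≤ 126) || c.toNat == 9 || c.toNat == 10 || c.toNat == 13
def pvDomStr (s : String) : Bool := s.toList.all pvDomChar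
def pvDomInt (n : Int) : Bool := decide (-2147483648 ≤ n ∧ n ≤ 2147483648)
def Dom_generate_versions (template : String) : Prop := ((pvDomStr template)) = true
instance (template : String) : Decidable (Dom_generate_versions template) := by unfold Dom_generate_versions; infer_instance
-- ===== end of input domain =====

-- B replaces A's split / index-table / copy-mutate / join pipeline by a single character-level
-- scan building both version strings at once (objective: alternative, same cost).

-- ===== PORT A =====
def generate_versions (template : String) : List String :=
  let parts := (PySem.Str.split? template ".").getD []
  let asterisks_indices :=
    ((PySem.List.enumerate parts 0).filter (fun p => p.2 == "*")).map (·.1)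
  let versions : List String := []
  let replacements_list : List (List Int) :=
    [List.replicate asterisks_indices.length 1, List.replicate asterisks_indices.length 2]
  replacements_list.foldl (fun versions replacements =>
    let version_parts := parts
    let version_parts := (asterisks_indices.zip replacements).foldl
      (fun vp (p : Int × Int) => PySem.List.pySetD vp p.1 (PySem.Int.toStr p.2)) version_parts
    versions ++ [PySem.Str.join "." version_parts]) versions

-- ===== PORT B =====
-- Python string concatenation is ported exactly as List Char append (strings handled on the
-- list-of-chars side throughout, converted once at the end).
def pvSubst (d : Char) (buf : List Char) : List Char := if buf = ['*'] then [d] else buf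

def pvStepB (st : List Char × List Char × List Char) (ch : Char) :
    List Char × List Char × List Char :=
  if ch = '.' then
    (st.1 ++ pvSubst '1' st.2.2 ++ ['.'], st.2.1 ++ pvSubst '2' st.2.2 ++ ['.'], [])
  else (st.1, st.2.1, st.2.2 ++ [ch])

def generate_versions_alt (template : String) : List String :=
  let fin := template.toList.foldl pvStepB ([], [], [])
  [String.ofList (fin.1 ++ pvSubst '1' fin.2.2),
   String.ofList (fin.2.1 ++ pvSubst '2' fin.2.2)]

-- ===== PRECONDITION & SPEC =====
def Spec_generate_versions (template : String) (out : List String) : Prop := out = generate_versions_alt template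
instance (template : String) (out : List String) : Decidable (Spec_generate_versions template out) := by unfold Spec_generate_versions; infer_instance

-- ===== CLAIM (what is proved, stated in full; the proofs are below) =====
def Claim_equal_generate_versions : Prop := ∀ (template : String), Dom_generate_versions template → Spec_generate_versions template (generate_versions template)

-- ===== LEMMAS AND PROOFS =====

-- ---- A-side: reduce A to a map over the split parts ----

lemma pv_zip_replicate {α β : Type} (xs : List α) (b : β) :
    xs.zip (List.replicate xs.length b) = xs.map (fun a => (a, b)) := by
  induction xs with
  | nil => rfl
  | cons x xs ih => simp [List.replicate_succ, ih]

lemma pv_set_append {α : Type} (pre : List α) (p : α) (ps : List α) (v : α) :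
    (pre ++ p :: ps).set pre.length v = pre ++ v :: ps := by
  induction pre with
  | nil => rfl
  | cons a pre ih => simp [ih]

lemma pv_main (s' : String) :
    ∀ (ps pre : List String),
      (((PySem.List.enumerate ps (pre.length : Int)).filter (fun p => p.2 == "*")).map (·.1)).foldl
        (fun vp i => PySem.List.pySetD vp i s') (pre ++ ps)
      = pre ++ ps.map (fun p => if p == "*" then s' else p) := by
  intro ps
  induction ps with
  | nil => intro pre; simp [PySem.List.enumerate_nil]
  | cons p ps ih =>
    intro pre
    have hcast : ((pre.length + 1 : Nat) : Int) = (pre.length : Int) + 1 := by push_cast; ring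
    rw [PySem.List.enumerate_cons, List.filter_cons]
    by_cases h : p = "*"
    · subst h
      have H := ih (pre ++ [s'])
      simp only [List.length_append, List.length_cons, List.length_nil,
        List.append_assoc, List.cons_append, List.nil_append, hcast] at H
      simp only [beq_self_eq_true, if_pos, List.map_cons, List.foldl_cons,
        PySem.List.pySetD_natCast, pv_set_append]
      simpa using H
    · have H := ih (pre ++ [p])
      simp only [List.length_append, List.length_cons, List.length_nil,
        List.append_assoc, List.cons_append, List.nil_append, hcast] at H
      have hb : (p == "*") = false := by simpa using h
      simp only [hb, if_neg, Bool.false_eq_true, not_false_iff]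
      simpa [hb, h] using H

lemma pv_one (parts : List String) (n : Int) :
    ((((PySem.List.enumerate parts 0).filter (fun p => p.2 == "*")).map (·.1)).zip
      (List.replicate (((PySem.List.enumerate parts 0).filter (fun p => p.2 == "*")).map (·.1)).length n)).foldl
      (fun vp (p : Int × Int) => PySem.List.pySetD vp p.1 (PySem.Int.toStr p.2)) parts
    = parts.map (fun p => if p == "*" then PySem.Int.toStr n else p) := by
  rw [pv_zip_replicate, List.foldl_map]
  have := pv_main (PySem.Int.toStr n) parts []
  simpa using this

-- ---- char-level theory shared by both sides ----

-- splitDot pre l: the '.'-separated parts of l, with pre the already-buffered prefix of the first part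
def splitDot (pre : List Char) : List Char → List (List Char)
  | [] => [pre]
  | c :: r => if c = '.' then pre :: splitDot [] r else splitDot (pre ++ [c]) r

lemma splitDot_ne_nil : ∀ (l pre : List Char), splitDot pre l ≠ [] := by
  intro l
  induction l with
  | nil => intro pre; simp [splitDot]
  | cons c r ih =>
    intro pre
    by_cases h : c = '.' <;> simp [splitDot, h, ih]

-- PySem.Chars.splitOn.go on the one-char separator ['.'] computes splitDot
lemma pv_go_eq : ∀ (fuel : Nat) (l cur : List Char) (acc : List (List Char)),
    l.length ≤ fuel →
    PySem.Chars.splitOn.go ['.'] fuel l cur acc = acc.reverse ++ splitDot cur.reverse l := by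
  intro fuel
  induction fuel with
  | zero =>
    intro l cur acc h
    have hl : l = [] := by cases l <;> simp_all
    subst hl
    simp [PySem.Chars.splitOn.go, splitDot]
  | succ fuel ih =>
    intro l cur acc h
    cases l with
    | nil => simp [PySem.Chars.splitOn.go, splitDot]
    | cons c rest =>
      have hlen : rest.length ≤ fuel := by simpa using h
      by_cases hc : c = '.'
      · subst hc
        have hpre : List.isPrefixOf ['.'] ('.' :: rest) = true := by simp [List.isPrefixOf]
        simp only [PySem.Chars.splitOn.go, hpre, if_pos]
        rw [ih _ _ _ (by simpa using hlen)]
        simp [splitDot]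
      · have hpre : List.isPrefixOf ['.'] (c :: rest) = false := by
          simp only [List.isPrefixOf, Bool.and_true, beq_eq_false_iff_ne, ne_eq]
          exact fun h => hc h.symm
        simp only [PySem.Chars.splitOn.go, hpre, Bool.false_eq_true, if_neg, not_false_iff]
        rw [ih _ _ _ hlen]
        simp [splitDot, hc]

lemma pv_splitOn_eq (s : List Char) : PySem.Chars.splitOn s ['.'] = splitDot [] s := by
  unfold PySem.Chars.splitOn
  rw [pv_go_eq (s.length + 1) s [] [] (by omega)]
  simp

-- the substituted join of the parts, computed directly by recursion on the characters
def sj (d : Char) (pre : List Char) : List Char → List Char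
  | [] => pvSubst d pre
  | c :: r => if c = '.' then (pvSubst d pre ++ ['.']) ++ sj d [] r else sj d (pre ++ [c]) r

lemma pv_join_sj (d : Char) : ∀ (l pre : List Char),
    PySem.Chars.join ['.'] ((splitDot pre l).map (pvSubst d)) = sj d pre l := by
  intro l
  induction l with
  | nil => intro pre; simp [splitDot, sj, PySem.Chars.join, List.intercalate]
  | cons c r ih =>
    intro pre
    by_cases hc : c = '.'
    · subst hc
      obtain ⟨x, xs, hx⟩ := List.exists_cons_of_ne_nil (splitDot_ne_nil r [])
      have h1 : splitDot pre ('.' :: r) = pre :: splitDot [] r := by simp [splitDot]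
      have h2 : sj d pre ('.' :: r) = (pvSubst d pre ++ ['.']) ++ sj d [] r := by simp [sj]
      rw [h1, h2, hx, List.map_cons, List.map_cons, PySem.Chars.join_cons_cons,
        ← List.map_cons, ← hx, ih]
    · have h1 : splitDot pre (c :: r) = splitDot (pre ++ [c]) r := by simp [splitDot, hc]
      have h2 : sj d pre (c :: r) = sj d (pre ++ [c]) r := by simp [sj, hc]
      rw [h1, h2, ih]

-- the B fold computes sj on both components
lemma pv_fold1 : ∀ (l v1 v2 buf : List Char),
    (List.foldl pvStepB (v1, v2, buf) l).1 ++ pvSubst '1' (List.foldl pvStepB (v1, v2, buf) l).2.2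
      = v1 ++ sj '1' buf l := by
  intro l
  induction l with
  | nil => intro v1 v2 buf; simp [sj]
  | cons c r ih =>
    intro v1 v2 buf
    by_cases hc : c = '.'
    · subst hc
      have hs : pvStepB (v1, v2, buf) '.'
          = (v1 ++ pvSubst '1' buf ++ ['.'], v2 ++ pvSubst '2' buf ++ ['.'], []) := by
        simp [pvStepB]
      rw [List.foldl_cons, hs, ih]
      simp [sj]
    · have hs : pvStepB (v1, v2, buf) c = (v1, v2, buf ++ [c]) := by simp [pvStepB, hc]
      rw [List.foldl_cons, hs, ih]
      simp [sj, hc]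

lemma pv_fold2 : ∀ (l v1 v2 buf : List Char),
    (List.foldl pvStepB (v1, v2, buf) l).2.1 ++ pvSubst '2' (List.foldl pvStepB (v1, v2, buf) l).2.2
      = v2 ++ sj '2' buf l := by
  intro l
  induction l with
  | nil => intro v1 v2 buf; simp [sj]
  | cons c r ih =>
    intro v1 v2 buf
    by_cases hc : c = '.'
    · subst hc
      have hs : pvStepB (v1, v2, buf) '.'
          = (v1 ++ pvSubst '1' buf ++ ['.'], v2 ++ pvSubst '2' buf ++ ['.'], []) := by
        simp [pvStepB]
      rw [List.foldl_cons, hs, ih]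
      simp [sj]
    · have hs : pvStepB (v1, v2, buf) c = (v1, v2, buf ++ [c]) := by simp [pvStepB, hc]
      rw [List.foldl_cons, hs, ih]
      simp [sj, hc]

-- string-level substitution on a part equals char-level pvSubst
lemma pv_subst_str (d : Char) (dS : String) (hd : dS = String.ofList [d]) (l : List Char) :
    (if String.ofList l == "*" then dS else String.ofList l) = String.ofList (pvSubst d l) := by
  by_cases h : l = ['*']
  · subst h; subst hd; rfl
  · have h2 : ¬ String.ofList l = "*" := by
      intro hc; exact h (by simpa using congrArg String.toList hc)
    simp [h, h2, pvSubst]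

-- one version, A's pipeline = char-level sj
lemma pv_side (cs : List Char) (d : Char) (dS : String) (hd : dS = String.ofList [d]) :
    PySem.Str.join "." ((((PySem.Chars.splitOn cs ['.']).map String.ofList)).map
      (fun p => if p == "*" then dS else p))
    = String.ofList (sj d [] cs) := by
  rw [List.map_map]
  have hmap : ((fun p => if p == "*" then dS else p) ∘ String.ofList)
      = fun l => String.ofList (pvSubst d l) := by
    funext l; exact pv_subst_str d dS hd l
  rw [hmap]
  unfold PySem.Str.join
  rw [pv_splitOn_eq, List.map_map]
  have hcomp : (String.toList ∘ fun l => String.ofList (pvSubst d l)) = pvSubst d := by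
    funext l; simp
  rw [hcomp]
  have hdot : (".".toList : List Char) = ['.'] := rfl
  rw [hdot, pv_join_sj d cs []]

-- ===== VERDICT (by name: the statement is the Claim_ definition above) =====
theorem generate_versions_spec : Claim_equal_generate_versions := by
  intro template _
  show generate_versions template = generate_versions_alt template
  unfold generate_versions generate_versions_alt
  simp only [List.foldl_cons, List.foldl_nil, pv_one]
  have hsplit : (PySem.Str.split? template ".").getD []
      = (PySem.Chars.splitOn template.toList ['.']).map String.ofList := by
    simp [PySem.Str.split?, PySem.Chars.split?]
  rw [hsplit]
  rw [pv_side template.toList '1' (PySem.Int.toStr 1) rfl,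
      pv_side template.toList '2' (PySem.Int.toStr 2) rfl]
  rw [pv_fold1 template.toList [] [] [], pv_fold2 template.toList [] [] []]
  simp
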